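-- pv_equiv track=rewrite | github.com/F2020-291-stm/mini-group-1 | database.py | get_next_lex
-- ===== SOURCE A (Python) =====
-- from string import ascii_lowercase, digits
--
-- def get_next_lex(string1):
--     string = string1.lower()
--     done = False
--     lex_order = ascii_lowercase + digits
--     if string is None or len(string) == 0:
--         return lex_order[0]
--     for index in range(len(string) - 1, -1, -1):
--         if string[index] != lex_order[-1]:
--             done = True
--             break
--     if not done:
--         return string + lex_order[0]
--     for index1 in range(len(lex_order)):
--         if string[index] == lex_order[index1]:
--             return string[:index]+lex_order[index1+1]+string[index + 1:]
-- ===== SOURCE B (Python) =====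
-- def _next_char(c):
--     # successor in the cyclic-free alphabet a..z then 0..9: 'z' -> '0', else next code point
--     return '0' if c == 'z' else chr(ord(c) + 1)
--
-- def _inc(s):
--     # recursively peel the last character; None means the whole suffix was '9's
--     if not s:
--         return None
--     if s[-1] == '9':
--         r = _inc(s[:-1])
--         return None if r is None else r + '9'
--     return s[:-1] + _next_char(s[-1])
--
-- def get_next_lex(string1):
--     s = string1.lower()
--     r = _inc(s)
--     return s + 'a' if r is None else r
-- ===== Notes on version B (the rewrite author's own statement) =====
-- stated objective: alternative
-- what changed: B replaces A's iterative reverse index scan plus linear 36-char alphabet search with a structural recursion that peels one trailing character at a time (None signalling an all-'9' suffix) and computes the successor character arithmetically from its code point instead of scanning a table.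
-- outside the precondition, e.g. on get_next_lex('a-'): A returns None, B returns 'a.'
import Mathlib
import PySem

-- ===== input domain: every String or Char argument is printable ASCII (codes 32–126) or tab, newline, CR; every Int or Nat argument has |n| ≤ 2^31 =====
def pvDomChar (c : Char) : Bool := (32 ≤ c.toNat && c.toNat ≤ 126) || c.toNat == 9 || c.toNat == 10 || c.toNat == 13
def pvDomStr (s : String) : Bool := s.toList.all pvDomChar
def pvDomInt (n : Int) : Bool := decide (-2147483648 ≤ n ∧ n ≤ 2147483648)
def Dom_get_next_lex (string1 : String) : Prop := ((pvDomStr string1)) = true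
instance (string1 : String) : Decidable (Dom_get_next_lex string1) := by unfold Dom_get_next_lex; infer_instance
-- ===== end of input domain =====

-- B increments the lowercased string by a structural recursion peeling trailing characters
-- (None = all-'9' suffix) with an arithmetic code-point successor, instead of A's two index
-- loops; objective: alternative.

-- lex_order = ascii_lowercase + digits (A's constant)
def pvLexOrder : List Char := "abcdefghijklmnopqrstuvwxyz0123456789".toList

-- ===== PORT A =====
-- A's first loop: 'for index in range(len(string)-1, -1, -1): if string[index] != '9': break'
-- (returns the break index, none when the loop ran out = 'done' stayed False)
def pvAScan (s : List Char) : Nat → Option Nat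
  | 0 => if s.getD 0 ' ' ≠ '9' then some 0 else none
  | i + 1 => if s.getD (i + 1) ' ' ≠ '9' then some (i + 1) else pvAScan s i

-- A's second loop: 'for index1 in range(len(lex_order)): if string[index] == lex_order[index1]: return …'
def pvAFind (c : Char) : List Char → Nat → Option Nat
  | [], _ => none
  | d :: rest, i => if c = d then some i else pvAFind c rest (i + 1)

-- A's body on the lowercased code-point list
def pvACore (s : List Char) : List Char :=
  if s.length = 0 then [pvLexOrder.getD 0 ' ']
  else
    match pvAScan s (s.length - 1) with
    | none => s ++ [pvLexOrder.getD 0 ' ']        -- 'if not done'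
    | some idx =>
      match pvAFind (s.getD idx ' ') pvLexOrder 0 with
      | some i1 => s.take idx ++ [pvLexOrder.getD (i1 + 1) ' '] ++ s.drop (idx + 1)
      | none => []   -- Python A falls off the loop and returns None here (excluded by Pre_)

def get_next_lex (string1 : String) : String :=
  String.ofList (pvACore (PySem.Str.lower string1).toList)

-- ===== PORT B =====
-- _next_char(c): '0' if c == 'z' else chr(ord(c)+1)
def pvNextChar (c : Char) : Char := if c = 'z' then '0' else Char.ofNat (c.toNat + 1)

-- _inc(s): recursively peel the last character; none means the whole suffix was '9's
def pvInc : List Char → Option (List Char)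
  | [] => none
  | c :: rest =>
    if (c :: rest).getLastD ' ' = '9'
    then (pvInc (c :: rest).dropLast).map (· ++ ['9'])
    else some ((c :: rest).dropLast ++ [pvNextChar ((c :: rest).getLastD ' ')])
  termination_by s => s.length
  decreasing_by simp

-- 'return s + 'a' if r is None else r'
def get_next_lex_alt (string1 : String) : String :=
  match pvInc (PySem.Str.lower string1).toList with
  | none => String.ofList ((PySem.Str.lower string1).toList ++ ['a'])
  | some t => String.ofList t

-- ===== PRECONDITION & SPEC =====
-- Pre_ excludes the strings whose last character before the trailing run of '9's is not in
-- a-z0-8 after .lower(): there Python A falls off its final loop and returns None (not a str)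
-- while B returns the next code point.
def Pre_get_next_lex (string1 : String) : Prop :=
  ((PySem.Str.lower string1).toList.reverse.dropWhile (· = '9')) = [] ∨
  ((PySem.Str.lower string1).toList.reverse.dropWhile (· = '9')).headD ' '
    ∈ "abcdefghijklmnopqrstuvwxyz012345678".toList
instance (string1 : String) : Decidable (Pre_get_next_lex string1) := by
  unfold Pre_get_next_lex; infer_instance

def pvWitness_get_next_lex : String := "ab"

def Spec_get_next_lex (string1 : String) (out : String) : Prop := out = get_next_lex_alt string1
instance (string1 : String) (out : String) : Decidable (Spec_get_next_lex string1 out) := by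
  unfold Spec_get_next_lex; infer_instance

-- ===== CLAIM (what is proved, stated in full; the proofs are below) =====
def Claim_equal_get_next_lex : Prop := ∀ (string1 : String), Dom_get_next_lex string1 → Pre_get_next_lex string1 → Spec_get_next_lex string1 (get_next_lex string1)

-- ===== LEMMAS AND PROOFS =====

-- unfolding of pvInc on a nonempty list
theorem pvInc_ne (s : List Char) (h : s ≠ []) :
    pvInc s = if s.getLastD ' ' = '9'
      then (pvInc s.dropLast).map (· ++ ['9'])
      else some (s.dropLast ++ [pvNextChar (s.getLastD ' ')]) := by
  cases s with
  | nil => exact absurd rfl h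
  | cons c rest => rw [pvInc]

-- B on an all-'9' list
theorem pvInc_replicate (k : Nat) : pvInc (List.replicate k '9') = none := by
  induction k with
  | zero => rw [List.replicate_zero, pvInc]
  | succ k ih =>
      rw [pvInc_ne _ (by simp)]
      have h1 : (List.replicate (k + 1) '9').getLastD ' ' = '9' := by
        rw [List.getLastD_eq_getLast?]
        cases k <;> simp [List.getLast?_replicate]
      have h2 : (List.replicate (k + 1) '9').dropLast = List.replicate k '9' := by
        simp [List.dropLast_replicate]
      rw [if_pos h1, h2, ih]
      rfl

-- B on q ++ '9'*k with q ending in c ≠ '9'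
theorem pvInc_split (q : List Char) (c : Char) (hc : q.getLast? = some c) (hc9 : c ≠ '9') :
    ∀ k, pvInc (q ++ List.replicate k '9')
      = some (q.dropLast ++ [pvNextChar c] ++ List.replicate k '9') := by
  have hqne : q ≠ [] := by intro h; rw [h] at hc; simp at hc
  intro k
  induction k with
  | zero =>
      rw [List.replicate_zero, List.append_nil, pvInc_ne q hqne]
      rw [List.getLastD_eq_getLast?, hc]
      simp [hc9]
  | succ k ih =>
      rw [pvInc_ne _ (by simp [hqne])]
      have h1 : (q ++ List.replicate (k + 1) '9').getLastD ' ' = '9' := by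
        rw [List.getLastD_eq_getLast?, List.getLast?_append_of_ne_nil _ (by simp)]
        cases k <;> simp [List.getLast?_replicate]
      have h2 : (q ++ List.replicate (k + 1) '9').dropLast = q ++ List.replicate k '9' := by
        simp [List.dropLast_replicate]
      rw [if_pos h1, h2, ih]
      simp [List.replicate_succ']

-- A's reverse scan finds nothing on an all-'9' prefix
theorem pvAScan_none (s : List Char) (d : Nat)
    (h : ∀ m, m ≤ d → s.getD m ' ' = '9') : pvAScan s d = none := by
  induction d with
  | zero =>
      simp only [pvAScan]
      rw [if_neg (not_not_intro (h 0 (Nat.le_refl 0)))]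
  | succ d ih =>
      simp only [pvAScan]
      rw [if_neg (not_not_intro (h (d + 1) (Nat.le_refl _)))]
      exact ih (fun m hm => h m (Nat.le_succ_of_le hm))

-- A's reverse scan stops at index j when everything above j (up to j+d) is '9'
theorem pvAScan_some (s : List Char) (j d : Nat)
    (hj : s.getD j ' ' ≠ '9') (h : ∀ m, j < m → m ≤ j + d → s.getD m ' ' = '9') :
    pvAScan s (j + d) = some j := by
  induction d with
  | zero =>
      cases j with
      | zero => simp only [pvAScan]; rw [if_pos hj]
      | succ j => simp only [pvAScan]; rw [if_pos hj]
  | succ d ih =>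
      have h9 : s.getD (j + d + 1) ' ' = '9' := h _ (by omega) (by omega)
      have harith : j + (d + 1) = (j + d) + 1 := by omega
      rw [harith]
      simp only [pvAScan]
      rw [if_neg (not_not_intro h9)]
      exact ih (fun m hm hm' => h m hm (by omega))

-- for each admissible character, A's alphabet scan yields B's arithmetic successor
theorem pvFind_next_bool :
    ("abcdefghijklmnopqrstuvwxyz012345678".toList.all fun c =>
      (pvAFind c pvLexOrder 0).map (fun i1 => pvLexOrder.getD (i1 + 1) ' ')
        == some (pvNextChar c)) = true := by decide

theorem pvFind_next : ∀ c ∈ "abcdefghijklmnopqrstuvwxyz012345678".toList,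
    (pvAFind c pvLexOrder 0).map (fun i1 => pvLexOrder.getD (i1 + 1) ' ')
      = some (pvNextChar c) := by
  intro c hc
  exact eq_of_beq (List.all_eq_true.mp pvFind_next_bool c hc)

-- B's top level, as a function of the code-point list
def pvBCore (s : List Char) : List Char :=
  match pvInc s with
  | none => s ++ ['a']
  | some t => t

theorem pvCore_eq (s : List Char)
    (hpre : s.reverse.dropWhile (· = '9') = [] ∨
            (s.reverse.dropWhile (· = '9')).headD ' '
              ∈ "abcdefghijklmnopqrstuvwxyz012345678".toList) :
    pvACore s = pvBCore s := by
  have hlex0 : pvLexOrder.getD 0 ' ' = 'a' := by decide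
  rcases hpre with h0 | hmem
  · -- all characters of s are '9'
    have hall : ∀ c ∈ s, c = '9' := by
      intro c hc
      have := List.dropWhile_eq_nil_iff.mp h0 c (List.mem_reverse.mpr hc)
      simpa using this
    have hrep : s = List.replicate s.length '9' := List.eq_replicate_of_mem hall
    have hB : pvBCore s = s ++ ['a'] := by
      rw [pvBCore, hrep, pvInc_replicate]
    rw [hB, pvACore]
    by_cases hlen : s.length = 0
    · have hnil : s = [] := List.eq_nil_of_length_eq_zero hlen
      rw [if_pos hlen, hnil, hlex0]
      rfl
    · have hscan : pvAScan s (s.length - 1) = none := by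
        apply pvAScan_none
        intro m hm
        have hms : m < s.length := by omega
        have hgd : s.getD m ' ' = s[m] := by
          rw [List.getD_eq_getElem?_getD, List.getElem?_eq_getElem hms]; rfl
        rw [hgd]
        exact hall _ (List.getElem_mem hms)
      rw [if_neg hlen, hscan, hlex0]
  · -- the last non-'9' character c exists and lies in a-z0-8
    set r := s.reverse.dropWhile (· = '9') with hr
    have hrne : r ≠ [] := by
      intro h; rw [h] at hmem; revert hmem; decide
    obtain ⟨c, t, hct⟩ := List.exists_cons_of_ne_nil hrne
    have hcmem : c ∈ "abcdefghijklmnopqrstuvwxyz012345678".toList := by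
      rw [hct] at hmem; simpa using hmem
    have hc9 : c ≠ '9' := by
      intro h; rw [h] at hcmem; revert hcmem; decide
    have hsplit : s.reverse = s.reverse.takeWhile (· = '9') ++ r := by
      rw [hr, List.takeWhile_append_dropWhile]
    set w := s.reverse.takeWhile (· = '9') with hw
    set k := w.length with hk
    have hwrep : w = List.replicate k '9' := by
      apply List.eq_replicate_of_mem
      intro b hb
      have := List.mem_takeWhile_imp hb
      simpa using this
    set q := r.reverse with hq
    have hsq : s = q ++ List.replicate k '9' := by
      conv_lhs => rw [← List.reverse_reverse s, hsplit]
      rw [List.reverse_append, hwrep, List.reverse_replicate]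
    have hqne : q ≠ [] := by simp [hq, hct]
    have hqlen : 0 < q.length := List.length_pos_iff.mpr hqne
    have hqlast? : q.getLast? = some c := by
      rw [hq, hct]
      have hrev : (c :: t).reverse = t.reverse ++ [c] := by simp
      rw [hrev, List.getLast?_append_of_ne_nil _ (by simp)]
      rfl
    have hqlast : q.getD (q.length - 1) ' ' = c := by
      rw [List.getD_eq_getElem?_getD, ← List.getLast?_eq_getElem?, hqlast?]
      rfl
    have hgetj : s.getD (q.length - 1) ' ' = c := by
      rw [hsq, List.getD_eq_getElem?_getD, List.getElem?_append_left (by omega),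
        ← List.getD_eq_getElem?_getD]
      exact hqlast
    have hlenq : s.length = q.length + k := by rw [hsq]; simp
    have hlen0 : ¬ s.length = 0 := by omega
    have hscan : pvAScan s (s.length - 1) = some (q.length - 1) := by
      have harith : s.length - 1 = (q.length - 1) + k := by omega
      rw [harith]
      apply pvAScan_some
      · rw [hgetj]; exact hc9
      · intro m hm hm'
        rw [hsq, List.getD_eq_getElem?_getD, List.getElem?_append_right (by omega),
          List.getElem?_replicate]
        have hmk : m - q.length < k := by omega
        simp [hmk]
    have hA : pvACore s = match pvAFind (s.getD (q.length - 1) ' ') pvLexOrder 0 with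
        | some i1 => s.take (q.length - 1) ++ [pvLexOrder.getD (i1 + 1) ' ']
            ++ s.drop (q.length - 1 + 1)
        | none => [] := by
      rw [pvACore, if_neg hlen0, hscan]
    rw [hgetj] at hA
    have hB : pvBCore s = q.dropLast ++ [pvNextChar c] ++ List.replicate k '9' := by
      rw [pvBCore, hsq, pvInc_split q c hqlast? hc9]
    rw [hA, hB]
    have hfind := pvFind_next c hcmem
    cases hf : pvAFind c pvLexOrder 0 with
    | none => rw [hf] at hfind; simp at hfind
    | some i1 =>
        rw [hf] at hfind
        simp only [Option.map_some, Option.some.injEq] at hfind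
        show List.take (q.length - 1) s ++ [pvLexOrder.getD (i1 + 1) ' ']
            ++ List.drop (q.length - 1 + 1) s = _
        rw [hfind]
        have harr : q.length - 1 + 1 = q.length := by omega
        rw [harr]
        have hdrop : s.drop q.length = List.replicate k '9' := by
          rw [hsq, List.drop_left]
        have htake : s.take (q.length - 1) = q.dropLast := by
          rw [hsq, List.take_append_of_le_length (by omega), List.dropLast_eq_take]
        rw [hdrop, htake]

-- ===== VERDICT (by name: the statement is the Claim_ definition above) =====
theorem get_next_lex_spec : Claim_equal_get_next_lex := by
  intro string1 _ hpre
  unfold Pre_get_next_lex at hpre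
  unfold Spec_get_next_lex get_next_lex get_next_lex_alt
  rw [pvCore_eq _ hpre]
  unfold pvBCore
  cases pvInc (PySem.Str.lower string1).toList <;> rfl
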